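-- pv_equiv track=rewrite | github.com/bytarnish/AGILE | agile/utils.py | get_sql
-- ===== SOURCE A (Python) =====
-- def get_sql(text):
--     # extract the sql
--     token = 'SELECT'
--     s = text.split('\n')
--     for line in s:
--         idx = line.find(token)
--         if idx == -1:
--             continue
--         return line[idx:], True
--     return '', False
-- ===== SOURCE B (Python) =====
-- def get_sql(text):
--     # extract the sql: direct search on the raw string, no line list
--     pos = text.find('SELECT')
--     if pos == -1:
--         return '', False
--     end = text.find('\n', pos)
--     if end == -1:
--         return text[pos:], True
--     return text[pos:end], True
-- ===== Notes on version B (the rewrite author's own statement) =====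
-- stated objective: simpler
-- what changed: Instead of splitting the text into a list of lines and scanning each line for the token, B does one direct find of the token on the raw string and cuts the result at the next newline found from that position, maintaining no line list.
import Mathlib
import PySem

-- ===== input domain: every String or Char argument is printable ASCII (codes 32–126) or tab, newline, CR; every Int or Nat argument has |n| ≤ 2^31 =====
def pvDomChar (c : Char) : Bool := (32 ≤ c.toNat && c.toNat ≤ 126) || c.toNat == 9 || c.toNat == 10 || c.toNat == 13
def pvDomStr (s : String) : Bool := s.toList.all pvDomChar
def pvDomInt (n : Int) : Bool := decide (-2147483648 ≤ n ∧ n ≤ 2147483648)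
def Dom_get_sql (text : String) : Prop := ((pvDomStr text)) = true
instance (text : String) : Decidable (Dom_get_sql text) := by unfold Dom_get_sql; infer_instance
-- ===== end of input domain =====

-- B replaces A's split-into-lines-and-scan-each-line loop by one direct find of 'SELECT'
-- in the raw text, cut at the next newline; objective: simpler (no line list).

-- ===== PORT A =====
-- the for-loop over the split lines
def get_sql_loop (token : List Char) : List (List Char) → String × Bool
  | [] => ("", false)
  | line :: rest =>
    let idx := PySem.Chars.find line token
    if idx = -1 then get_sql_loop token rest
    else (String.ofList (PySem.Chars.slice line (some idx) none), true)

def get_sql (text : String) : String × Bool :=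
  let token := "SELECT".toList
  let s := PySem.Chars.splitOn text.toList "\n".toList
  get_sql_loop token s

-- ===== PORT B =====
def get_sql_alt (text : String) : String × Bool :=
  let cs := text.toList
  let pos := PySem.Chars.find cs "SELECT".toList
  if pos = -1 then ("", false)
  else
    let e := PySem.Chars.findFrom cs "\n".toList pos
    if e = -1 then (String.ofList (PySem.Chars.slice cs (some pos) none), true)
    else (String.ofList (PySem.Chars.slice cs (some pos) (some e)), true)

-- ===== PRECONDITION & SPEC =====
def Spec_get_sql (text : String) (out : String × Bool) : Prop := out = get_sql_alt text
instance (text : String) (out : String × Bool) : Decidable (Spec_get_sql text out) := by unfold Spec_get_sql; infer_instance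

-- ===== CLAIM (what is proved, stated in full; the proofs are below) =====
def Claim_equal_get_sql : Prop := ∀ (text : String), Dom_get_sql text → Spec_get_sql text (get_sql text)

-- ===== LEMMAS AND PROOFS =====

-- B's body at the List Char level, generic in the token (proof helper)
def pvAlt (sub cs : List Char) : String × Bool :=
  let pos := PySem.Chars.find cs sub
  if pos = -1 then ("", false)
  else
    let e := PySem.Chars.findFrom cs ['\n'] pos
    if e = -1 then (String.ofList (PySem.Chars.slice cs (some pos) none), true)
    else (String.ofList (PySem.Chars.slice cs (some pos) (some e)), true)

lemma pv_alt_eq (text : String) : get_sql_alt text = pvAlt "SELECT".toList text.toList := rfl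

-- structural model of text.split('\n')
def pvLinesAux (cur : List Char) : List Char → List (List Char)
  | [] => [cur.reverse]
  | c :: rest => if c = '\n' then cur.reverse :: pvLinesAux [] rest else pvLinesAux (c :: cur) rest

lemma pv_go_nil (fuel : Nat) (cur : List Char) (acc : List (List Char)) :
    PySem.Chars.splitOn.go ['\n'] fuel [] cur acc = (cur.reverse :: acc).reverse := by
  cases fuel <;> simp [PySem.Chars.splitOn.go]

lemma pv_go_newline (fuel : Nat) (rest cur : List Char) (acc : List (List Char)) :
    PySem.Chars.splitOn.go ['\n'] (fuel+1) ('\n'::rest) cur acc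
      = PySem.Chars.splitOn.go ['\n'] fuel rest [] (cur.reverse :: acc) := by
  simp [PySem.Chars.splitOn.go]

lemma pv_go_other (fuel : Nat) (c : Char) (hc : c ≠ '\n') (rest cur : List Char) (acc : List (List Char)) :
    PySem.Chars.splitOn.go ['\n'] (fuel+1) (c::rest) cur acc
      = PySem.Chars.splitOn.go ['\n'] fuel rest (c::cur) acc := by
  simp [PySem.Chars.splitOn.go, List.isPrefixOf]
  exact fun h => absurd h.symm hc

lemma pv_go_eq_linesAux (l : List Char) : ∀ (fuel : Nat) (cur : List Char) (acc : List (List Char)),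
    l.length ≤ fuel →
    PySem.Chars.splitOn.go ['\n'] fuel l cur acc = acc.reverse ++ pvLinesAux cur l := by
  induction l with
  | nil => intro fuel cur acc _; simp [pv_go_nil, pvLinesAux]
  | cons c rest ih =>
    intro fuel cur acc h
    cases fuel with
    | zero => simp at h
    | succ f =>
      by_cases hc : c = '\n'
      · subst hc
        rw [pv_go_newline, ih f [] _ (by simpa using h)]
        simp [pvLinesAux]
      · rw [pv_go_other f c hc, ih f (c::cur) acc (by simpa using h)]
        simp [pvLinesAux, hc]

lemma pv_splitOn_newline (s : List Char) :
    PySem.Chars.splitOn s ['\n'] = pvLinesAux [] s := by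
  have := pv_go_eq_linesAux s (s.length + 1) [] [] (by omega)
  simpa [PySem.Chars.splitOn] using this

lemma pv_linesAux_no_newline {l : List Char} (h : '\n' ∉ l) (cur : List Char) :
    pvLinesAux cur l = [cur.reverse ++ l] := by
  induction l generalizing cur with
  | nil => simp [pvLinesAux]
  | cons c rest ih =>
    have hc : c ≠ '\n' := by rintro rfl; exact h (List.mem_cons_self ..)
    have hr : '\n' ∉ rest := fun hm => h (List.mem_cons_of_mem _ hm)
    simp [pvLinesAux, hc, ih hr]

lemma pv_linesAux_break {head : List Char} (h : '\n' ∉ head) (rest cur : List Char) :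
    pvLinesAux cur (head ++ '\n' :: rest) = (cur.reverse ++ head) :: pvLinesAux [] rest := by
  induction head generalizing cur with
  | nil => simp [pvLinesAux]
  | cons c hd ih =>
    have hc : c ≠ '\n' := by rintro rfl; exact h (List.mem_cons_self ..)
    have hr : '\n' ∉ hd := fun hm => h (List.mem_cons_of_mem _ hm)
    simp [pvLinesAux, hc, ih hr]

-- no occurrence of sub can straddle the newline: prefixes inside the head part transfer both ways
lemma pv_prefix_drop_append {sub head rest : List Char} {c : Char} (hc : c ∉ sub)
    {j : Nat} (hj : j ≤ head.length) :
    sub <+: (head ++ c :: rest).drop j ↔ sub <+: head.drop j := by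
  rw [List.drop_append_of_le_length hj]
  constructor
  · intro h
    by_cases hlen : sub.length ≤ (head.drop j).length
    · exact (List.isPrefix_append_of_length hlen).mp h
    · exfalso
      have hpc : (head.drop j ++ [c]) <+: (head.drop j ++ c :: rest) := ⟨rest, by simp⟩
      rcases List.prefix_or_prefix_of_prefix h hpc with h2 | h2
      · have hl2 := h2.length_le
        have hlen2 : sub.length = (head.drop j ++ [c]).length := by
          simp only [List.length_append, List.length_cons, List.length_nil] at hl2 ⊢
          omega
        have hsub : sub = head.drop j ++ [c] := h2.eq_of_length hlen2
        exact hc (hsub ▸ (by simp : c ∈ head.drop j ++ [c]))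
      · exact hc (h2.subset (by simp))
  · intro h
    exact h.trans (List.prefix_append _ _)

lemma pv_find_neg_iff (s sub : List Char) :
    PySem.Chars.find s sub = -1 ↔ ∀ j, ¬ sub <+: s.drop j := by
  rw [PySem.Chars.find_eq_neg_one_iff, ← PySem.Chars.isIn_iff_infix,
    ← PySem.Chars.exists_prefix_drop_iff_isIn]
  push_neg
  rfl

lemma pv_find_eq_coe {s sub : List Char} {k : Nat}
    (h1 : sub <+: s.drop k) (h2 : ∀ i < k, ¬ sub <+: s.drop i) :
    PySem.Chars.find s sub = (k : Int) := by
  have hnn : 0 ≤ PySem.Chars.find s sub := by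
    rw [PySem.Chars.find_nonneg_iff]
    obtain ⟨t, ht⟩ := h1
    exact ⟨s.take k, t, by rw [List.append_assoc, ht, List.take_append_drop]⟩
  obtain ⟨hp, hmin⟩ := PySem.Chars.find_spec hnn
  have htc : (PySem.Chars.find s sub).toNat = k := by
    rcases Nat.lt_trichotomy (PySem.Chars.find s sub).toNat k with h | h | h
    · exact absurd hp (h2 _ h)
    · exact h
    · exact absurd h1 (hmin _ h)
  omega

lemma pv_find_newline_in_append {hd rest : List Char} (h : '\n' ∉ hd) :
    PySem.Chars.find (hd ++ '\n' :: rest) ['\n'] = (hd.length : Int) := by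
  apply pv_find_eq_coe
  · rw [List.drop_append_of_le_length (le_refl _)]
    simp
  · intro i hi hp
    rw [List.drop_append_of_le_length (le_of_lt hi)] at hp
    obtain ⟨t, ht⟩ := hp
    cases hdi : hd.drop i with
    | nil =>
      have := congrArg List.length hdi
      simp at this
      omega
    | cons x xs =>
      rw [hdi] at ht
      simp only [List.cons_append, List.cons.injEq] at ht
      have hxm : x ∈ hd := List.mem_of_mem_drop (hdi ▸ List.mem_cons_self ..)
      exact h (ht.1 ▸ hxm)

lemma pv_find_none_of_not_mem {s : List Char} (h : '\n' ∉ s) :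
    PySem.Chars.find s ['\n'] = -1 := by
  rw [pv_find_neg_iff]
  intro j hp
  exact h (List.drop_subset j s (hp.subset (List.mem_singleton_self _)))

lemma pv_drop_past {head rest : List Char} {c : Char} {k : Nat} :
    (head ++ c :: rest).drop (head.length + 1 + k) = rest.drop k := by
  rw [show head ++ c :: rest = (head ++ [c]) ++ rest by simp,
    show head.length + 1 + k = (head ++ [c]).length + k by simp, List.drop_append]
  simp

lemma pv_find_append_of_some {sub head rest : List Char} (hc : '\n' ∉ sub)
    (h1 : 0 ≤ PySem.Chars.find head sub) :
    PySem.Chars.find (head ++ '\n' :: rest) sub = PySem.Chars.find head sub := by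
  obtain ⟨hp, hmin⟩ := PySem.Chars.find_spec h1
  have hle : (PySem.Chars.find head sub).toNat ≤ head.length := by
    have := PySem.Chars.find_le_length head sub; omega
  have : PySem.Chars.find (head ++ '\n' :: rest) sub = ((PySem.Chars.find head sub).toNat : Int) := by
    apply pv_find_eq_coe
    · exact (pv_prefix_drop_append hc hle).mpr hp
    · intro i hi hpre
      exact hmin i hi ((pv_prefix_drop_append hc (by omega)).mp hpre)
  omega

lemma pv_find_append_of_none {sub head rest : List Char} (hc : '\n' ∉ sub)
    (hh : PySem.Chars.find head sub = -1) :
    PySem.Chars.find (head ++ '\n' :: rest) sub =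
      if PySem.Chars.find rest sub = -1 then -1
      else (head.length : Int) + 1 + PySem.Chars.find rest sub := by
  rw [pv_find_neg_iff] at hh
  by_cases hfr : PySem.Chars.find rest sub = -1
  · rw [if_pos hfr, pv_find_neg_iff]
    rw [pv_find_neg_iff] at hfr
    intro j hp
    by_cases hj : j ≤ head.length
    · exact hh j ((pv_prefix_drop_append hc hj).mp hp)
    · have hj' : j = head.length + 1 + (j - head.length - 1) := by omega
      rw [hj', pv_drop_past] at hp
      exact hfr _ hp
  · rw [if_neg hfr]
    have h0 : 0 ≤ PySem.Chars.find rest sub := by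
      have := PySem.Chars.neg_one_le_find rest sub; omega
    obtain ⟨hp, hmin⟩ := PySem.Chars.find_spec h0
    have : PySem.Chars.find (head ++ '\n' :: rest) sub
        = ((head.length + 1 + (PySem.Chars.find rest sub).toNat : Nat) : Int) := by
      apply pv_find_eq_coe
      · rw [pv_drop_past]; exact hp
      · intro i hi hpre
        by_cases hile : i ≤ head.length
        · exact hh i ((pv_prefix_drop_append hc hile).mp hpre)
        · have hi' : i = head.length + 1 + (i - head.length - 1) := by omega
          rw [hi', pv_drop_past] at hpre
          exact hmin _ (by omega) hpre
    omega

lemma pv_split_first {cs : List Char} (h : '\n' ∈ cs) :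
    ∃ head rest, cs = head ++ '\n' :: rest ∧ '\n' ∉ head ∧ rest.length < cs.length := by
  induction cs with
  | nil => simp at h
  | cons c cs ih =>
    by_cases hc : c = '\n'
    · exact ⟨[], cs, by simp [hc], by simp, by simp⟩
    · have h' : '\n' ∈ cs := by
        rcases List.mem_cons.mp h with h1 | h1
        · exact absurd h1.symm hc
        · exact h1
      obtain ⟨hd, r, e1, e2, e3⟩ := ih h'
      refine ⟨c :: hd, r, by simp [e1], ?_, by simp; omega⟩
      simp only [List.mem_cons, not_or]
      exact ⟨fun he => hc he.symm, e2⟩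

-- A's loop on the lines of cs agrees with B's direct search (generic token, no newline inside it)
lemma pv_base {sub : List Char} (cs : List Char) (h : '\n' ∉ cs) :
    get_sql_loop sub (pvLinesAux [] cs) = pvAlt sub cs := by
  rw [pv_linesAux_no_newline h]
  simp only [List.reverse_nil, List.nil_append, get_sql_loop, pvAlt]
  by_cases hf : PySem.Chars.find cs sub = -1
  · simp [hf]
  · have h0 : 0 ≤ PySem.Chars.find cs sub := by
      have := PySem.Chars.neg_one_le_find cs sub; omega
    have hle := PySem.Chars.find_le_length cs sub
    have hk : PySem.Chars.find cs sub = ((PySem.Chars.find cs sub).toNat : Int) := by omega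
    have he : PySem.Chars.findFrom cs ['\n'] (PySem.Chars.find cs sub) = -1 := by
      rw [hk, PySem.Chars.findFrom_natCast cs ['\n'] _ (by omega)]
      rw [pv_find_none_of_not_mem (fun hm => h (List.drop_subset _ cs hm))]
      simp
    simp only [if_neg hf, he, if_pos]

lemma pv_main {sub : List Char} (hnl : '\n' ∉ sub) :
    ∀ (n : Nat) (cs : List Char), cs.length ≤ n →
      get_sql_loop sub (pvLinesAux [] cs) = pvAlt sub cs := by
  intro n
  induction n with
  | zero =>
    intro cs hlen
    have : cs = [] := by cases cs <;> simp_all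
    subst this
    exact pv_base [] (by simp)
  | succ n ih =>
    intro cs hlen
    by_cases hmem : '\n' ∈ cs
    · -- split cs at its first newline
      obtain ⟨head, rest, hcs, hnhead, hlt⟩ := pv_split_first hmem
      have hlen' : rest.length ≤ n := by omega
      rw [hcs, pv_linesAux_break hnhead]
      simp only [List.reverse_nil, List.nil_append, get_sql_loop]
      by_cases hfh : PySem.Chars.find head sub = -1
      · -- no token in the first line: continue; B skips past the newline the same way
        rw [if_pos hfh, ih rest hlen']
        simp only [pvAlt]
        rw [pv_find_append_of_none hnl hfh]
        by_cases hfr : PySem.Chars.find rest sub = -1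
        · simp [hfr]
        · have hb0 : 0 ≤ PySem.Chars.find rest sub := by
            have := PySem.Chars.neg_one_le_find rest sub; omega
          have hble := PySem.Chars.find_le_length rest sub
          set b := (PySem.Chars.find rest sub).toNat with hbdef
          have hbc : PySem.Chars.find rest sub = (b : Int) := by omega
          have hpos : (head.length : Int) + 1 + (b : Int)
              = ((head.length + 1 + b : Nat) : Int) := by push_cast; omega
          simp only [hbc]
          simp only [hpos]
          simp only [if_neg (show ¬ ((head.length + 1 + b : Nat) : Int) = -1 by omega),
            if_neg (show ¬ ((b : Nat) : Int) = -1 by omega)]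
          have hdrop : (head ++ '\n' :: rest).drop (head.length + 1 + b) = rest.drop b :=
            pv_drop_past
          have hff : PySem.Chars.findFrom (head ++ '\n' :: rest) ['\n']
                ((head.length + 1 + b : Nat) : Int)
              = if PySem.Chars.find (rest.drop b) ['\n'] = -1 then -1
                else ((head.length + 1 + b : Nat) : Int) + PySem.Chars.find (rest.drop b) ['\n'] := by
            rw [PySem.Chars.findFrom_natCast _ _ _ (by
              simp only [List.length_append, List.length_cons]; omega), hdrop]
          have hff' : PySem.Chars.findFrom rest ['\n'] ((b : Nat) : Int)
              = if PySem.Chars.find (rest.drop b) ['\n'] = -1 then -1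
                else ((b : Nat) : Int) + PySem.Chars.find (rest.drop b) ['\n'] := by
            rw [PySem.Chars.findFrom_natCast _ _ _ (by omega)]
          simp only [hff, hff']
          by_cases hg : PySem.Chars.find (rest.drop b) ['\n'] = -1
          · simp only [if_pos hg, if_pos]
            congr 2
            simp only [PySem.Chars.slice_eq_listSlice]
            rw [PySem.List.slice_from _ (by positivity), PySem.List.slice_from _ (by positivity)]
            simp only [Int.toNat_natCast]
            exact hdrop.symm
          · have hg0 : 0 ≤ PySem.Chars.find (rest.drop b) ['\n'] := by
              have := PySem.Chars.neg_one_le_find (rest.drop b) ['\n']; omega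
            set g := PySem.Chars.find (rest.drop b) ['\n'] with hgdef
            simp only [if_neg hg]
            simp only [if_neg (show ¬ ((head.length + 1 + b : Nat) : Int) + g = -1 by omega),
              if_neg (show ¬ ((b : Nat) : Int) + g = -1 by omega)]
            congr 2
            simp only [PySem.Chars.slice_eq_listSlice]
            rw [PySem.List.slice_toNat _ (by positivity) (by omega),
              PySem.List.slice_toNat _ (by positivity) (by omega)]
            have h1 : (((head.length + 1 + b : Nat) : Int)).toNat = head.length + 1 + b := by omega
            have h2 : ((((head.length + 1 + b : Nat) : Int)) + g).toNat = head.length + 1 + b + g.toNat := by omega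
            have h3 : ((b : Int)).toNat = b := by omega
            have h4 : ((b : Int) + g).toNat = b + g.toNat := by omega
            rw [h1, h2, h3, h4, hdrop]
            congr 1
            omega
      · -- token found in the first line: A returns line[idx:], B cuts at the next newline
        have h0 : 0 ≤ PySem.Chars.find head sub := by
          have := PySem.Chars.neg_one_le_find head sub; omega
        have hle := PySem.Chars.find_le_length head sub
        set a := (PySem.Chars.find head sub).toNat with hadef
        have hac : PySem.Chars.find head sub = (a : Int) := by omega
        rw [if_neg hfh]
        simp only [pvAlt]
        rw [pv_find_append_of_some hnl h0, hac]
        simp only [if_neg (show ¬ ((a : Nat) : Int) = -1 by omega)]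
        have hdropa : (head ++ '\n' :: rest).drop a = head.drop a ++ '\n' :: rest :=
          List.drop_append_of_le_length (by omega)
        have hff : PySem.Chars.findFrom (head ++ '\n' :: rest) ['\n'] ((a : Nat) : Int)
            = ((head.length : Nat) : Int) := by
          rw [PySem.Chars.findFrom_natCast _ _ _ (by
              simp only [List.length_append, List.length_cons]; omega), hdropa,
            pv_find_newline_in_append (fun hm => hnhead (List.drop_subset _ head hm)),
            if_neg (show ¬ ((head.drop a).length : Int) = -1 by omega)]
          simp only [List.length_drop]
          omega
        simp only [hff, if_neg (show ¬ ((head.length : Nat) : Int) = -1 by omega)]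
        congr 2
        simp only [PySem.Chars.slice_eq_listSlice]
        rw [PySem.List.slice_from _ (by positivity),
          PySem.List.slice_toNat _ (by positivity) (by positivity)]
        have h1 : ((a : Int)).toNat = a := by omega
        have h2 : ((head.length : Int)).toNat = head.length := by omega
        rw [h1, h2, hdropa]
        have h3 : head.length - a = (head.drop a).length := by simp
        rw [h3, List.take_left]
    · exact pv_base cs hmem

-- ===== VERDICT (by name: the statement is the Claim_ definition above) =====
theorem get_sql_spec : Claim_equal_get_sql := by
  intro text _
  show get_sql text = get_sql_alt text
  rw [pv_alt_eq]
  show get_sql_loop "SELECT".toList (PySem.Chars.splitOn text.toList "\n".toList) = _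
  have hsep : "\n".toList = ['\n'] := rfl
  rw [hsep, pv_splitOn_newline]
  exact pv_main (by decide) text.toList.length text.toList (le_refl _)
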